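-- pv_equiv track=rewrite | github.com/jocologne/ProjectEuler | Python/52.py | checa_numero
-- ===== SOURCE A (Python) =====
-- def checa_numero(n):
--     corr = ''
--     nn = str(n)
--     for i in range(0, 10):
--         if str(i) in nn:
--             corr = corr + '1'
--         else:
--             corr = corr + '0'
--     return (corr)
-- ===== SOURCE B (Python) =====
-- def checa_numero(n):
--     mask = ['0'] * 10
--     for c in str(n):
--         if '0' <= c <= '9':
--             mask[ord(c) - 48] = '1'
--     return ''.join(mask)
-- ===== Notes on version B (the rewrite author's own statement) =====
-- stated objective: alternative
-- what changed: A runs a separate substring search over str(n) for every digit character; B makes a single scatter pass over the characters of str(n), marking a fixed-size digit-presence mask that is joined at the end.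
import Mathlib
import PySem

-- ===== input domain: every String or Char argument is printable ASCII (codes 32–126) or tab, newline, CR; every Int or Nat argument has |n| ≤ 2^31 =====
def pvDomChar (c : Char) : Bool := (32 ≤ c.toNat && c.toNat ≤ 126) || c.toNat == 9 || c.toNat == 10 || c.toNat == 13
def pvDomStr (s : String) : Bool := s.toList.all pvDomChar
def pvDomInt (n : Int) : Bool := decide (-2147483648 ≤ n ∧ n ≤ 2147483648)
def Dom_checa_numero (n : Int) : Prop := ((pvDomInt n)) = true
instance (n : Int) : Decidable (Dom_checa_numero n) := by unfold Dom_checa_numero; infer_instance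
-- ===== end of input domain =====

-- B replaces A's ten substring scans over str(n) by one scatter pass that marks a 10-slot digit mask (objective: alternative decomposition, same output).

-- ===== PORT A =====
def checa_numero (n : Int) : String :=
  let nn := PySem.Int.toStr n
  (PySem.List.pyRange 0 10 1).foldl
    (fun corr i =>
      if PySem.Str.isIn (PySem.Int.toStr i) nn then corr ++ "1" else corr ++ "0") ""

-- ===== PORT B =====
-- single-character Python strings are ported as Char; ord(c) - 48 is c.toNat - 48 (exact: both
-- are the code point); ''.join over a list of single ASCII characters is String.ofList (exact here).
def checa_numero_alt (n : Int) : String :=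
  let mask := (PySem.Int.toChars n).foldl
    (fun m c => if '0' ≤ c ∧ c ≤ '9' then m.set (c.toNat - 48) '1' else m)
    (List.replicate 10 '0')
  String.ofList mask

-- ===== PRECONDITION & SPEC =====
def Spec_checa_numero (n : Int) (out : String) : Prop := out = checa_numero_alt n
instance (n : Int) (out : String) : Decidable (Spec_checa_numero n out) := by unfold Spec_checa_numero; infer_instance

-- ===== CLAIM (what is proved, stated in full; the proofs are below) =====
def Claim_equal_checa_numero : Prop := ∀ (n : Int), Dom_checa_numero n → Spec_checa_numero n (checa_numero n)

-- ===== LEMMAS AND PROOFS =====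

/-- The digit character for `j < 10`. -/
def pvDigit (j : Nat) : Char := Char.ofNat (48 + j)

/-- The character both programs produce at position `j`, given the characters `cs` of `str(n)`. -/
def pvBit (cs : List Char) (j : Nat) : Char := if pvDigit j ∈ cs then '1' else '0'

lemma pvDigit_toNat (j : Nat) (hj : j < 10) : (pvDigit j).toNat = 48 + j := by
  unfold pvDigit; interval_cases j <;> decide

lemma pvDigit_isDigit (j : Nat) (hj : j < 10) : '0' ≤ pvDigit j ∧ pvDigit j ≤ '9' := by
  show 48 ≤ (pvDigit j).toNat ∧ (pvDigit j).toNat ≤ 57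
  rw [pvDigit_toNat j hj]; omega

lemma char_toNat_inj (a b : Char) : a.toNat = b.toNat ↔ a = b :=
  eq_iff_eq_of_cmp_eq_cmp rfl

/-- `sub in s` for a single-character `sub` is membership of that character. -/
lemma isIn_single (c : Char) (s : String) :
    PySem.Str.isIn (String.ofList [c]) s = decide (c ∈ s.toList) := by
  by_cases hm : c ∈ s.toList
  · simp only [hm, decide_true]
    rw [PySem.Str.isIn_iff_infix]
    simpa [List.singleton_infix_iff] using hm
  · simp only [hm, decide_false]
    have h := PySem.Str.isIn_iff_infix (sub := String.ofList [c]) (s := s)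
    simp only [String.toList_ofList, List.singleton_infix_iff] at h
    rcases hb : PySem.Str.isIn (String.ofList [c]) s with _ | _
    · rfl
    · exact absurd (h.mp hb) hm

/-- One step of A's loop body, seen through `toList`. -/
lemma toList_append_bit (s : String) (b : Bool) :
    (if b then s ++ "1" else s ++ "0").toList = s.toList ++ [if b then '1' else '0'] := by
  cases b <;> simp

/-- A's result, characterised digit by digit. -/
lemma checa_numero_eq_bits (n : Int) :
    checa_numero n =
      String.ofList ((List.range 10).map (pvBit (PySem.Int.toChars n))) := by
  apply String.toList_inj.mp
  unfold checa_numero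
  have hr : PySem.List.pyRange 0 10 1 = [0,1,2,3,4,5,6,7,8,9] := by decide
  have hs : ∀ i : Int, PySem.Int.toStr i = String.ofList [pvDigit i.toNat] →
      PySem.Str.isIn (PySem.Int.toStr i) (PySem.Int.toStr n)
        = decide (pvDigit i.toNat ∈ PySem.Int.toChars n) := by
    intro i hi
    rw [hi, isIn_single, PySem.Int.toList_toStr]
  rw [hr]
  simp only [List.foldl]
  rw [hs 0 (by decide), hs 1 (by decide), hs 2 (by decide), hs 3 (by decide), hs 4 (by decide),
      hs 5 (by decide), hs 6 (by decide), hs 7 (by decide), hs 8 (by decide), hs 9 (by decide)]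
  simp only [toList_append_bit]
  simp [List.range_succ, pvBit]

/-- B's loop body, named for the proofs. -/
def pvMark (m : List Char) (c : Char) : List Char :=
  if '0' ≤ c ∧ c ≤ '9' then m.set (c.toNat - 48) '1' else m

lemma length_foldl_pvMark (cs : List Char) (m : List Char) :
    (cs.foldl pvMark m).length = m.length := by
  induction cs generalizing m with
  | nil => rfl
  | cons c cs ih => simp only [List.foldl]; rw [ih]; unfold pvMark; split <;> simp

lemma getD_foldl_pvMark (cs : List Char) (m : List Char) (hm : m.length = 10)
    (j : Nat) (hj : j < 10) :
    (cs.foldl pvMark m).getD j ' ' = if pvDigit j ∈ cs then '1' else m.getD j ' ' := by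
  induction cs generalizing m with
  | nil => simp
  | cons c cs ih =>
    have hlen : (pvMark m c).length = 10 := by unfold pvMark; split <;> simp [hm]
    simp only [List.foldl]
    rw [ih (pvMark m c) hlen]
    by_cases hmem : pvDigit j ∈ cs
    · simp [hmem]
    · simp only [hmem, if_false, List.mem_cons, or_false]
      unfold pvMark
      by_cases hdig : '0' ≤ c ∧ c ≤ '9'
      · have hbounds : 48 ≤ c.toNat ∧ c.toNat ≤ 57 := hdig
        rw [if_pos hdig]
        by_cases heq : pvDigit j = c
        · have hcj : c.toNat - 48 = j := by
            rw [← heq, pvDigit_toNat j hj]; omega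
          rw [if_pos heq, hcj, List.getD_eq_getElem?_getD,
            List.getElem?_set_self (by omega)]
          rfl
        · have hne : c.toNat - 48 ≠ j := by
            intro hcj
            exact heq ((char_toNat_inj _ _).mp (by rw [pvDigit_toNat j hj]; omega))
          rw [if_neg heq, List.getD_eq_getElem?_getD,
            List.getElem?_set_ne hne, ← List.getD_eq_getElem?_getD]
      · rw [if_neg hdig]
        have hne : pvDigit j ≠ c := fun h => hdig (h ▸ pvDigit_isDigit j hj)
        rw [if_neg hne]

/-- B's result, characterised digit by digit. -/
lemma checa_numero_alt_eq_bits (n : Int) :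
    checa_numero_alt n =
      String.ofList ((List.range 10).map (pvBit (PySem.Int.toChars n))) := by
  show String.ofList ((PySem.Int.toChars n).foldl pvMark (List.replicate 10 '0')) = _
  congr 1
  have h1 : ((PySem.Int.toChars n).foldl pvMark (List.replicate 10 '0')).length = 10 := by
    rw [length_foldl_pvMark]; simp
  apply List.ext_getElem
  · simpa using h1
  · intro j hj1 hj2
    have hj : j < 10 := by rwa [h1] at hj1
    rw [← List.getD_eq_getElem _ ' ', ← List.getD_eq_getElem _ ' ',
      getD_foldl_pvMark _ _ (by simp) j hj,
      List.getD_eq_getElem _ ' ' hj2, List.getElem_map, List.getElem_range]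
    unfold pvBit
    split_ifs
    · rfl
    · interval_cases j <;> rfl

-- ===== VERDICT (by name: the statement is the Claim_ definition above) =====
theorem checa_numero_spec : Claim_equal_checa_numero := by
  intro n _
  unfold Spec_checa_numero
  rw [checa_numero_eq_bits, checa_numero_alt_eq_bits]
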